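-- pv_equiv track=rewrite | github.com/trung-hn-bk/questions | KnightMoves.py | final_pos
-- ===== SOURCE A (Python) =====
-- def final_pos(pos=(5, 4), moves="AGG"):
--     delta = {"A": (-1, 2), "B": (-2, 1), "C": (-2, -1), "D": (-1, -2),
--              "E": (1, -2), "F": (2, -1), "G": (2, 1), "H": (1, 2)}
--     x, y = pos
--     for move in moves:
--         dx, dy = delta[move]
--         x += dx
--         y += dy
--     return x, y
-- ===== SOURCE B (Python) =====
-- def final_pos(pos=(5, 4), moves="AGG"):
--     dxs = {"A": -1, "B": -2, "C": -2, "D": -1, "E": 1, "F": 2, "G": 2, "H": 1}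
--     dys = {"A": 2, "B": 1, "C": -1, "D": -2, "E": -2, "F": -1, "G": 1, "H": 2}
--     counts = {}
--     for ch in moves:
--         counts[ch] = counts.get(ch, 0) + 1
--     x, y = pos
--     for ch, n in counts.items():
--         x += n * dxs[ch]
--         y += n * dys[ch]
--     return x, y
-- ===== Notes on version B (the rewrite author's own statement) =====
-- stated objective: alternative
-- what changed: B builds a frequency table of the move letters and adds count*dx and count*dy once per distinct letter from split per-axis delta tables, instead of A's per-character sequential accumulation over one (dx,dy) dict.
import Mathlib
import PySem

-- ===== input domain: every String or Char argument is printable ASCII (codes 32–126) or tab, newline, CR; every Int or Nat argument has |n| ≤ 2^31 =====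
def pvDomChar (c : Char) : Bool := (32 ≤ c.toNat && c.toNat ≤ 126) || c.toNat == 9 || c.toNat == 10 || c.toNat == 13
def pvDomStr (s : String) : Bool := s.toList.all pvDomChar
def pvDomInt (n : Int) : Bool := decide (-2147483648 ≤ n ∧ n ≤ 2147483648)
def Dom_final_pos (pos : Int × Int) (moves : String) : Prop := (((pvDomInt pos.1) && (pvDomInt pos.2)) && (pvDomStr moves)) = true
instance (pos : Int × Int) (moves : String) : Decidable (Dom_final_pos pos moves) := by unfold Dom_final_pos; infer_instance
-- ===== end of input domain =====

-- B replaces A's per-character accumulation by a frequency table over the distinct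
-- move letters, adding count*dx / count*dy once per letter from split per-axis
-- delta tables (objective: alternative).

-- ===== PORT A =====
def pvDeltaA : PySem.Dict Char (Int × Int) :=
  PySem.Dict.ofList [('A', (-1, 2)), ('B', (-2, 1)), ('C', (-2, -1)), ('D', (-1, -2)),
                     ('E', (1, -2)), ('F', (2, -1)), ('G', (2, 1)), ('H', (1, 2))]

-- delta[move] raises KeyError on a letter outside A–H; Pre_ excludes exactly those
-- inputs, so the getD default is never reached inside Pre_.
def final_pos (pos : Int × Int) (moves : String) : Int × Int :=
  moves.toList.foldl (fun xy move =>
    let d := pvDeltaA.getD move (0, 0)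
    (xy.1 + d.1, xy.2 + d.2)) pos

-- ===== PORT B =====
def pvDX : PySem.Dict Char Int :=
  PySem.Dict.ofList [('A', -1), ('B', -2), ('C', -2), ('D', -1), ('E', 1), ('F', 2), ('G', 2), ('H', 1)]
def pvDY : PySem.Dict Char Int :=
  PySem.Dict.ofList [('A', 2), ('B', 1), ('C', -1), ('D', -2), ('E', -2), ('F', -1), ('G', 1), ('H', 2)]

-- dxs[ch] / dys[ch] raise KeyError outside A–H, excluded by Pre_ just as for A.
def final_pos_alt (pos : Int × Int) (moves : String) : Int × Int :=
  let counts : PySem.Dict Char Int :=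
    moves.toList.foldl (fun c ch => c.insert ch (c.getD ch 0 + 1)) PySem.Dict.empty
  counts.items.foldl (fun xy p =>
    (xy.1 + p.2 * pvDX.getD p.1 0, xy.2 + p.2 * pvDY.getD p.1 0)) pos

-- ===== PRECONDITION & SPEC =====
-- Pre_ excludes moves containing a character outside "ABCDEFGH": there the Python A
-- (and B) raises KeyError.
def Pre_final_pos (pos : Int × Int) (moves : String) : Prop :=
  moves.toList.all (fun c => c ∈ ['A','B','C','D','E','F','G','H']) = true
instance (pos : Int × Int) (moves : String) : Decidable (Pre_final_pos pos moves) := by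
  unfold Pre_final_pos; infer_instance
def pvWitness_final_pos : (Int × Int) × String := ((5, 4), "AGG")

def Spec_final_pos (pos : Int × Int) (moves : String) (out : Int × Int) : Prop :=
  out = final_pos_alt pos moves
instance (pos : Int × Int) (moves : String) (out : Int × Int) : Decidable (Spec_final_pos pos moves out) := by
  unfold Spec_final_pos; infer_instance

-- ===== CLAIM (what is proved, stated in full; the proofs are below) =====
def Claim_equal_final_pos : Prop := ∀ (pos : Int × Int) (moves : String),
  Dom_final_pos pos moves → Pre_final_pos pos moves → Spec_final_pos pos moves (final_pos pos moves)

-- ===== LEMMAS AND PROOFS =====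

-- A's paired table agrees pointwise with B's split tables (also at the 0 defaults)
theorem pvDXA (c : Char) : (pvDeltaA.getD c (0, 0)).1 = pvDX.getD c 0 := by
  have hA : pvDeltaA = PySem.Dict.mk [('A', (-1, 2)), ('B', (-2, 1)), ('C', (-2, -1)), ('D', (-1, -2)),
      ('E', (1, -2)), ('F', (2, -1)), ('G', (2, 1)), ('H', (1, 2))] := by decide
  have hX : pvDX = PySem.Dict.mk [('A', -1), ('B', -2), ('C', -2), ('D', -1),
      ('E', 1), ('F', 2), ('G', 2), ('H', 1)] := by decide
  rw [hA, hX]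
  simp only [PySem.Dict.getD, PySem.Dict.get?_mk_cons]
  split_ifs <;> rfl

theorem pvDYA (c : Char) : (pvDeltaA.getD c (0, 0)).2 = pvDY.getD c 0 := by
  have hA : pvDeltaA = PySem.Dict.mk [('A', (-1, 2)), ('B', (-2, 1)), ('C', (-2, -1)), ('D', (-1, -2)),
      ('E', (1, -2)), ('F', (2, -1)), ('G', (2, 1)), ('H', (1, 2))] := by decide
  have hY : pvDY = PySem.Dict.mk [('A', 2), ('B', 1), ('C', -1), ('D', -2),
      ('E', -2), ('F', -1), ('G', 1), ('H', 2)] := by decide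
  rw [hA, hY]
  simp only [PySem.Dict.getD, PySem.Dict.get?_mk_cons]
  split_ifs <;> rfl

-- a componentwise-additive pair fold is pos plus the componentwise sums
theorem pvFoldlPair {α : Type} (g : α → Int × Int) (l : List α) (p : Int × Int) :
    l.foldl (fun xy a => (xy.1 + (g a).1, xy.2 + (g a).2)) p
      = (p.1 + (l.map fun a => (g a).1).sum, p.2 + (l.map fun a => (g a).2).sum) := by
  induction l generalizing p with
  | nil => simp
  | cons a l ih => simp [ih]; constructor <;> ring

theorem pvSelectSum (h : Char → Int) (x : Char) (ks : List Char)
    (hnd : ks.Nodup) (hx : x ∈ ks) :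
    (ks.map fun k => (if k = x then (1 : Int) else 0) * h k).sum = h x := by
  induction ks with
  | nil => simp at hx
  | cons k ks ih =>
    rcases List.nodup_cons.mp hnd with ⟨hk, hnd'⟩
    rcases List.mem_cons.mp hx with rfl | hx'
    · have hz : (ks.map fun k' => if k' = x then h k' else 0).sum = 0 := by
        apply List.sum_eq_zero
        intro y hy
        rcases List.mem_map.mp hy with ⟨k', hk', rfl⟩
        have hne : k' ≠ x := fun e => hk (e ▸ hk')
        simp [hne]
      simp [hz]
    · have hkx : k ≠ x := fun e => hk (e ▸ hx')
      simp only [List.map_cons, List.sum_cons, if_neg hkx, zero_mul, zero_add]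
      exact ih hnd' hx'

-- grouping: summing h over l equals summing count·h over any nodup cover of l
theorem pvGroupSum (h : Char → Int) (l ks : List Char)
    (hnd : ks.Nodup) (hsub : ∀ x ∈ l, x ∈ ks) :
    (ks.map fun k => (l.count k : Int) * h k).sum = (l.map h).sum := by
  induction l with
  | nil => simp
  | cons x l ih =>
    have hx : x ∈ ks := hsub x (List.mem_cons_self ..)
    have hsub' : ∀ y ∈ l, y ∈ ks := fun y hy => hsub y (List.mem_cons_of_mem _ hy)
    have hsplit : (ks.map fun k => ((x :: l).count k : Int) * h k)
        = ks.map fun k => (l.count k : Int) * h k + (if k = x then (1 : Int) else 0) * h k := by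
      apply List.map_congr_left
      intro k _
      rw [List.count_cons]
      rcases eq_or_ne k x with rfl | hne
      · simp
        ring
      · simp [beq_iff_eq, hne, Ne.symm hne]
    rw [hsplit, List.sum_map_add, ih hsub', pvSelectSum h x ks hnd hx]
    simp
    ring

theorem final_pos_eq (pos : Int × Int) (moves : String) :
    final_pos pos moves = final_pos_alt pos moves := by
  simp only [final_pos, final_pos_alt, PySem.Dict.foldl_insert_getD_add_one_eq_counter,
    PySem.Dict.items_counter]
  set l := moves.toList with hl
  have hB : ((PySem.Set.ofList l).map fun k => (k, (l.count k : Int))).foldl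
      (fun xy p => (xy.1 + p.2 * pvDX.getD p.1 0, xy.2 + p.2 * pvDY.getD p.1 0)) pos
      = (PySem.Set.ofList l).foldl
      (fun xy k => (xy.1 + (l.count k : Int) * pvDX.getD k 0,
                    xy.2 + (l.count k : Int) * pvDY.getD k 0)) pos := by
    rw [List.foldl_map]
  rw [hB]
  rw [pvFoldlPair (fun move => pvDeltaA.getD move (0, 0)) l pos,
      pvFoldlPair (fun k => ((l.count k : Int) * pvDX.getD k 0,
                             (l.count k : Int) * pvDY.getD k 0)) (PySem.Set.ofList l) pos]
  have hnd : (PySem.Set.ofList l : List Char).Nodup := PySem.Set.nodup_ofList l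
  have hsub : ∀ x ∈ l, x ∈ (PySem.Set.ofList l : List Char) :=
    fun x hx => (PySem.Set.mem_ofList _ _).mpr hx
  have h1 := pvGroupSum (fun k => pvDX.getD k 0) l _ hnd hsub
  have h2 := pvGroupSum (fun k => pvDY.getD k 0) l _ hnd hsub
  simp only [pvDXA, pvDYA, ← h1, ← h2]

-- ===== VERDICT (by name: the statement is the Claim_ definition above) =====
theorem final_pos_spec : Claim_equal_final_pos := by
  intro pos moves _ _
  unfold Spec_final_pos
  exact final_pos_eq pos moves
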